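-- pv_equiv track=rewrite | github.com/JoshAgustinT/hybrid_bf_compiler | test.py | mandle_example
-- ===== SOURCE A (Python) =====
-- def mandle_example(p0, p3, p_11,p_1):
--     while(p0 != 0):
--         #offset 0
--         p0 -= 1
--         #offset 3
--         p3 += 1
--         #offset -1
--         p_11 += 1*p_1
--         p_1 += -1*p_1
--         p3 += -1*p_1
--         p_1 = 0
--         #offset 0
--
--
--     return p0, p3, p_11,p_1
-- ===== SOURCE B (Python) =====
-- def mandle_example(p0, p3, p_11, p_1):
--     # Closed form of the loop: if it runs at all (p0 > 0), p_1 is moved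
--     # into p_11 once and zeroed, and p3 absorbs all p0 decrements.
--     if p0 == 0:
--         return p0, p3, p_11, p_1
--     return 0, p3 + p0, p_11 + p_1, 0
-- ===== Notes on version B (the rewrite author's own statement) =====
-- stated objective: faster
-- what changed: Replaces the p0-step while loop by its O(1) closed form: p3 += p0, p_11 += p_1 and p_1 = 0 when the loop runs at all, unchanged when p0 == 0.
import Mathlib
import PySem

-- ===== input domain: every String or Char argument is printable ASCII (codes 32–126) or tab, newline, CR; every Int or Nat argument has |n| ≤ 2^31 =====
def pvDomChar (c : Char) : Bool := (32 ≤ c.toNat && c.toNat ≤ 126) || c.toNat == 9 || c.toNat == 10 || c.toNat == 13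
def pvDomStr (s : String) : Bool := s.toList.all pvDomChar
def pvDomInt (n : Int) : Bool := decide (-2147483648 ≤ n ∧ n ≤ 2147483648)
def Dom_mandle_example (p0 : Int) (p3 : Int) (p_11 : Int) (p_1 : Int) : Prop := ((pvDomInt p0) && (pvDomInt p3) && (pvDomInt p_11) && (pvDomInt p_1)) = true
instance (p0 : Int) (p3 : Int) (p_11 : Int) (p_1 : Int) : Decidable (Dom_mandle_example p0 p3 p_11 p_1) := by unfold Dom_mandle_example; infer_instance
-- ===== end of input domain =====

-- ===== PORT A =====
-- while(p0 != 0): the loop body, step for step; fuel = p0.toNat (exact for p0 ≥ 0,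
-- which Pre_ guarantees — for p0 < 0 the Python loop never terminates).
def mandleLoopA (fuel : Nat) (p0 : Int) (p3 : Int) (p_11 : Int) (p_1 : Int) : List Int :=
  match fuel with
  | 0 => [p0, p3, p_11, p_1]
  | n + 1 =>
    if p0 ≠ 0 then
      let p0' := p0 - 1
      let p3' := p3 + 1
      let p_11' := p_11 + 1 * p_1
      let p_1' := p_1 + (-1) * p_1
      let p3'' := p3' + (-1) * p_1'
      let p_1'' := (0 : Int)
      mandleLoopA n p0' p3'' p_11' p_1''
    else [p0, p3, p_11, p_1]

def mandle_example (p0 : Int) (p3 : Int) (p_11 : Int) (p_1 : Int) : List Int :=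
  mandleLoopA p0.toNat p0 p3 p_11 p_1

-- ===== PORT B =====
def mandle_example_alt (p0 : Int) (p3 : Int) (p_11 : Int) (p_1 : Int) : List Int :=
  if p0 = 0 then [p0, p3, p_11, p_1] else [0, p3 + p0, p_11 + p_1, 0]

-- ===== PRECONDITION & SPEC =====
-- A's while loop never terminates when p0 < 0 (p0 only decreases), so A returns exactly when 0 ≤ p0.
def Pre_mandle_example (p0 : Int) (p3 : Int) (p_11 : Int) (p_1 : Int) : Prop := 0 ≤ p0
instance (p0 : Int) (p3 : Int) (p_11 : Int) (p_1 : Int) : Decidable (Pre_mandle_example p0 p3 p_11 p_1) := by unfold Pre_mandle_example; infer_instance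
def pvWitness_mandle_example : Int × Int × Int × Int := (3, 10, 100, 7)
def Spec_mandle_example (p0 : Int) (p3 : Int) (p_11 : Int) (p_1 : Int) (out : List Int) : Prop := out = mandle_example_alt p0 p3 p_11 p_1
instance (p0 : Int) (p3 : Int) (p_11 : Int) (p_1 : Int) (out : List Int) : Decidable (Spec_mandle_example p0 p3 p_11 p_1 out) := by unfold Spec_mandle_example; infer_instance

-- ===== CLAIM (what is proved, stated in full; the proofs are below) =====
def Claim_equal_mandle_example : Prop := ∀ (p0 : Int) (p3 : Int) (p_11 : Int) (p_1 : Int), Dom_mandle_example p0 p3 p_11 p_1 → Pre_mandle_example p0 p3 p_11 p_1 → Spec_mandle_example p0 p3 p_11 p_1 (mandle_example p0 p3 p_11 p_1)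

-- ===== LEMMAS AND PROOFS =====
lemma mandleLoopA_closed (n : Nat) (p3 p_11 p_1 : Int) :
    mandleLoopA n (n : Int) p3 p_11 p_1 =
      if (n : Int) = 0 then [(n : Int), p3, p_11, p_1] else [0, p3 + n, p_11 + p_1, 0] := by
  induction n generalizing p3 p_11 p_1 with
  | zero => simp [mandleLoopA]
  | succ k ih =>
    have hne : ((k : Int) + 1) ≠ 0 := by positivity
    simp only [Nat.cast_succ, mandleLoopA, hne, if_true, ne_eq, not_false_eq_true, if_neg]
    have : (k : Int) + 1 - 1 = (k : Int) := by ring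
    rw [this, ih]
    split_ifs with h
    · simp [h]
    · simp
      omega

-- ===== VERDICT (by name: the statement is the Claim_ definition above) =====
theorem mandle_example_spec : Claim_equal_mandle_example := by
  intro p0 p3 p_11 p_1 _ hpre
  unfold Spec_mandle_example mandle_example mandle_example_alt
  obtain ⟨n, rfl⟩ := Int.eq_ofNat_of_zero_le hpre
  simpa using mandleLoopA_closed n p3 p_11 p_1
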